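-- pv_equiv track=rewrite | github.com/haolunc/ARC-RL | reference_solutions/solutions/af902bf9.py | transform
-- ===== SOURCE A (Python) =====
-- def transform(grid):
--
--     if not grid:
--         return grid
--     rows = len(grid)
--     cols = len(grid[0])
--     out = [row[:] for row in grid]
--
--     for r1 in range(rows - 1):
--         for r2 in range(r1 + 1, rows):
--
--             common_cols = [c for c in range(cols) if grid[r1][c] == 4 and grid[r2][c] == 4]
--             if len(common_cols) >= 2:
--                 m = len(common_cols)
--                 for i in range(m):
--                     for j in range(i + 1, m):
--                         c1 = common_cols[i]
--                         c2 = common_cols[j]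
--
--                         for r in range(r1 + 1, r2):
--                             for c in range(c1 + 1, c2):
--                                 out[r][c] = 2
--     return out
-- ===== SOURCE B (Python) =====
-- def transform(grid):
--     if not grid:
--         return grid
--     cols = len(grid[0])
--     # per-row list of columns holding a 4 (ascending), computed once
--     fours = [[c for c in range(cols) if row[c] == 4] for row in grid]
--     out = [row[:] for row in grid]
--     for r1 in range(len(grid) - 1):
--         for r2 in range(r1 + 1, len(grid)):
--             common = [c for c in fours[r1] if c in fours[r2]]
--             if len(common) >= 2:
--                 lo, hi = common[0] + 1, common[-1]
--                 for r in range(r1 + 1, r2):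
--                     out[r][lo:hi] = [2] * (hi - lo)
--     return out
-- ===== Notes on version B (the rewrite author's own statement) =====
-- stated objective: faster
-- what changed: B precomputes each row's 4-columns once and, per row pair, replaces A's quadratic loop over all pairs of common 4-columns (each re-filling a sub-rectangle cell by cell) by one slice-fill between the smallest and largest common 4-column; Pre_ excludes ragged grids (a row shorter than the first row), where A usually raises IndexError and only sometimes returns thanks to short-circuit evaluation, while B's per-row precomputation always raises there.
-- outside the precondition, e.g. on transform([[6], []]): A returns [[6], []], B raises IndexError
import Mathlib
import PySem

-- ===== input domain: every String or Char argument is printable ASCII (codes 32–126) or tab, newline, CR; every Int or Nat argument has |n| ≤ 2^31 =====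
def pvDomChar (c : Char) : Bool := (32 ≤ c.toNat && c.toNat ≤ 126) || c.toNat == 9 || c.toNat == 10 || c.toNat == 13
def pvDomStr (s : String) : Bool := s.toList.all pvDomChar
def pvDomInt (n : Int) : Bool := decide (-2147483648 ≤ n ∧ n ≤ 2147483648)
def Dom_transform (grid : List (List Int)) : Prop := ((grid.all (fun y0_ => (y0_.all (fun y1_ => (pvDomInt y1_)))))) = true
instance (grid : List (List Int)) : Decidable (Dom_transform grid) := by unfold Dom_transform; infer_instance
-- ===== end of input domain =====

-- B precomputes each row's 4-columns and fills, per row pair, one rectangle between the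
-- smallest and largest common 4-column by slice assignment, instead of A's quadratic loop
-- over all pairs of common 4-columns each re-filling a sub-rectangle cell by cell.

-- ===== PORT A =====
-- grid[r][c] (indices here are always in range under Pre_; pyGetD is exact there)
def pvGet2 (g : List (List Int)) (r c : Int) : Int :=
  PySem.List.pyGetD (PySem.List.pyGetD g r []) c 0

-- out[r][c] = v (always in range under Pre_; pySetD is exact there)
def pvSet2 (g : List (List Int)) (r c : Int) (v : Int) : List (List Int) :=
  PySem.List.pySetD g r (PySem.List.pySetD (PySem.List.pyGetD g r []) c v)

-- "for r in range(r1+1, r2): for c in range(c1+1, c2): out[r][c] = 2"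
def pvFillA (r1 r2 c1 c2 : Int) (out : List (List Int)) : List (List Int) :=
  (PySem.List.pyRange (r1 + 1) r2 1).foldl (fun out r =>
    (PySem.List.pyRange (c1 + 1) c2 1).foldl (fun out c => pvSet2 out r c 2) out) out

def transform (grid : List (List Int)) : List (List Int) :=
  if grid = [] then grid
  else
    let rows : Int := grid.length
    let cols : Int := (PySem.List.pyGetD grid 0 []).length
    let out0 : List (List Int) := grid.map (fun row => PySem.List.slice row none none)
    (PySem.List.pyRange 0 (rows - 1) 1).foldl (fun out r1 =>
      (PySem.List.pyRange (r1 + 1) rows 1).foldl (fun out r2 =>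
        let common := (PySem.List.pyRange 0 cols 1).filter
          (fun c => pvGet2 grid r1 c == 4 && pvGet2 grid r2 c == 4)
        if 2 ≤ common.length then
          let m : Int := common.length
          (PySem.List.pyRange 0 m 1).foldl (fun out i =>
            (PySem.List.pyRange (i + 1) m 1).foldl (fun out j =>
              pvFillA r1 r2 (PySem.List.pyGetD common i 0) (PySem.List.pyGetD common j 0) out) out) out
        else out) out) out0

-- ===== PORT B =====
-- "out[r][lo:hi] = [2] * (hi - lo)": exact for 0 ≤ lo ≤ hi (Python slice assignment of a
-- same-shape clamped slice is take/replicate/drop)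
def pvSliceFill (row : List Int) (lo hi : Int) : List Int :=
  PySem.List.slice row none (some lo) ++ List.replicate (hi - lo).toNat 2 ++
    PySem.List.slice row (some hi) none

def transform_alt (grid : List (List Int)) : List (List Int) :=
  if grid = [] then grid
  else
    let cols : Int := (PySem.List.pyGetD grid 0 []).length
    let fours : List (List Int) := grid.map (fun row =>
      (PySem.List.pyRange 0 cols 1).filter (fun c => PySem.List.pyGetD row c 0 == 4))
    let out0 : List (List Int) := grid.map (fun row => PySem.List.slice row none none)
    (PySem.List.pyRange 0 ((grid.length : Int) - 1) 1).foldl (fun out r1 =>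
      (PySem.List.pyRange (r1 + 1) (grid.length : Int) 1).foldl (fun out r2 =>
        let common := (PySem.List.pyGetD fours r1 []).filter
          (fun c => decide (c ∈ PySem.List.pyGetD fours r2 []))
        if 2 ≤ common.length then
          let lo := PySem.List.pyGetD common 0 0 + 1
          let hi := PySem.List.pyGetD common (-1) 0
          (PySem.List.pyRange (r1 + 1) r2 1).foldl (fun out r =>
            PySem.List.pySetD out r (pvSliceFill (PySem.List.pyGetD out r []) lo hi)) out
        else out) out) out0

-- ===== PRECONDITION & SPEC =====
-- Pre_ excludes ragged grids (some row shorter than the first row): A reads grid[r][c]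
-- for c < len(grid[0]) and raises IndexError on most of them, returning only when
-- short-circuit evaluation skips the short row; B's per-row precomputation raises there.
def Pre_transform (grid : List (List Int)) : Prop :=
  ∀ row ∈ grid, (PySem.List.pyGetD grid 0 []).length ≤ row.length
instance (grid : List (List Int)) : Decidable (Pre_transform grid) := by
  unfold Pre_transform; infer_instance

def pvWitness_transform : List (List Int) := [[4, 0, 4], [0, 0, 0], [4, 0, 4]]

def Spec_transform (grid : List (List Int)) (out : List (List Int)) : Prop := out = transform_alt grid
instance (grid : List (List Int)) (out : List (List Int)) : Decidable (Spec_transform grid out) := by unfold Spec_transform; infer_instance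

-- ===== CLAIM (what is proved, stated in full; the proofs are below) =====
def Claim_equal_transform : Prop := ∀ (grid : List (List Int)), Dom_transform grid → Pre_transform grid → Spec_transform grid (transform grid)

-- ===== LEMMAS AND PROOFS =====

/-- cell (i,j) of the 2-D state, as an Option. -/
def pvCell (g : List (List Int)) (i j : Nat) : Option Int := (g[i]?.getD [])[j]?

/-- two 2-D states with equal row-length profiles and equal cells are equal -/
lemma pvExt2 {a b : List (List Int)} (hs : a.map List.length = b.map List.length)
    (hc : ∀ i j, pvCell a i j = pvCell b i j) : a = b := by
  have hlen : a.length = b.length := by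
    simpa using congrArg List.length hs
  apply List.ext_getElem hlen
  intro i hi hib
  have hrow : a[i].length = b[i].length := by
    have h1 := congrArg (fun l => l[i]?) hs
    simp only [List.getElem?_map, List.getElem?_eq_getElem, hi, hib, Option.map_some] at h1
    simpa using h1
  apply List.ext_getElem hrow
  intro j hj hjb
  have := hc i j
  simp only [pvCell, List.getElem?_eq_getElem, hi, hib, Option.getD_some] at this
  simp only [List.getElem?_eq_getElem, hj, hjb, Option.some.injEq] at this
  exact this

lemma pvRowSet_getElem? (row : List Int) (c : Int) (hc : 0 ≤ c) (v : Int) (j : Nat) :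
    (PySem.List.pySetD row c v)[j]? =
      if c = (j : Int) then (row[j]?).map (fun _ => v) else row[j]? := by
  rw [PySem.List.pySetD_of_nonneg row v hc, List.getElem?_set]
  by_cases h : c = (j : Int)
  · have ht : c.toNat = j := by omega
    rw [if_pos ht, if_pos h, ht]
    by_cases hj : j < row.length
    · rw [if_pos hj, List.getElem?_eq_getElem hj, Option.map_some]
    · rw [if_neg hj, List.getElem?_eq_none_iff.mpr (by omega), Option.map_none]
  · have ht : c.toNat ≠ j := by omega
    rw [if_neg ht, if_neg h]

lemma pvSet2_getElem? (g : List (List Int)) (r c : Int) (hr : 0 ≤ r) (v : Int) (i : Nat) :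
    (pvSet2 g r c v)[i]? =
      if r = (i : Int) then (g[i]?).map (fun row => PySem.List.pySetD row c v) else g[i]? := by
  unfold pvSet2
  rw [PySem.List.pySetD_of_nonneg _ _ hr, PySem.List.pyGetD_of_nonneg _ _ hr, List.getElem?_set]
  by_cases h : r = (i : Int)
  · have ht : r.toNat = i := by omega
    rw [if_pos ht, if_pos h, ht]
    by_cases hi : i < g.length
    · rw [if_pos hi, List.getElem?_eq_getElem hi, Option.map_some,
        List.getD_eq_getElem?_getD, List.getElem?_eq_getElem hi, Option.getD_some]
    · rw [if_neg hi, List.getElem?_eq_none_iff.mpr (by omega), Option.map_none]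
  · have ht : r.toNat ≠ i := by omega
    rw [if_neg ht, if_neg h]

lemma pvCell_set2 (g : List (List Int)) (r c : Int) (hr : 0 ≤ r) (hc : 0 ≤ c) (v : Int)
    (i j : Nat) :
    pvCell (pvSet2 g r c v) i j =
      if r = (i : Int) ∧ c = (j : Int) then (pvCell g i j).map (fun _ => v)
      else pvCell g i j := by
  simp only [pvCell, pvSet2_getElem? g r c hr v i]
  by_cases h1 : r = (i : Int)
  · rw [if_pos h1]
    cases hrow : g[i]? with
    | none =>
      by_cases h2 : c = (j : Int) <;> simp [h1, h2]
    | some row =>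
      simp only [Option.map_some, Option.getD_some]
      rw [pvRowSet_getElem? row c hc v j]
      by_cases h2 : c = (j : Int) <;> simp [h1, h2]
  · rw [if_neg h1, if_neg (by tauto)]

lemma pvShape_set2 (g : List (List Int)) (r c : Int) (hr : 0 ≤ r) (v : Int) :
    (pvSet2 g r c v).map List.length = g.map List.length := by
  apply List.ext_getElem?
  intro i
  simp only [List.getElem?_map, pvSet2_getElem? g r c hr v i]
  by_cases h : r = (i : Int)
  · rw [if_pos h]
    cases hrow : g[i]? <;> simp [PySem.List.length_pySetD]
  · rw [if_neg h]

lemma pvFoldlInv {α : Type} (P : List (List Int) → Prop) (L : List α)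
    (f : List (List Int) → α → List (List Int))
    (h : ∀ s a, a ∈ L → P s → P (f s a)) :
    ∀ s, P s → P (L.foldl f s) := by
  induction L with
  | nil => intro s hs; simpa using hs
  | cons x xs ih =>
    intro s hs
    simp only [List.foldl_cons]
    exact ih (fun s a ha hp => h s a (by simp [ha]) hp) _ (h s x (by simp) hs)

lemma pvFoldlCongrInv {α : Type} (P : List (List Int) → Prop) (L : List α)
    (f g : List (List Int) → α → List (List Int))
    (h : ∀ s a, a ∈ L → P s → f s a = g s a ∧ P (f s a)) :
    ∀ s, P s → L.foldl f s = L.foldl g s := by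
  induction L with
  | nil => intro s _; rfl
  | cons x xs ih =>
    intro s hs
    simp only [List.foldl_cons]
    obtain ⟨heq, hp⟩ := h s x (by simp) hs
    rw [heq]
    exact ih (fun s a ha hp => h s a (by simp [ha]) hp) _ (heq ▸ hp)

lemma pvCell_colLoop (r : Int) (hr : 0 ≤ r) (n : Nat) :
    ∀ (a b : Int), 0 ≤ a → (b - a).toNat = n → ∀ g i j,
    pvCell ((PySem.List.pyRange a b 1).foldl (fun out c => pvSet2 out r c 2) g) i j =
      if r = (i : Int) ∧ a ≤ (j : Int) ∧ (j : Int) < b then (pvCell g i j).map (fun _ => 2)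
      else pvCell g i j := by
  induction n with
  | zero =>
    intro a b ha hn g i j
    rw [PySem.List.pyRange_one_eq_nil (by omega)]
    rw [List.foldl_nil, if_neg (by omega)]
  | succ n ih =>
    intro a b ha hn g i j
    rw [PySem.List.pyRange_one_cons (by omega), List.foldl_cons]
    rw [ih (a + 1) b (by omega) (by omega)]
    rw [pvCell_set2 g r a hr ha 2 i j]
    split_ifs <;> first | rfl | (exfalso; omega)

lemma pvCell_rowLoop (r2 c1 c2 : Int) (hc : 0 ≤ c1 + 1) (n : Nat) :
    ∀ a, 0 ≤ a → (r2 - a).toNat = n → ∀ g i j,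
    pvCell ((PySem.List.pyRange a r2 1).foldl (fun out r =>
        (PySem.List.pyRange (c1 + 1) c2 1).foldl (fun out c => pvSet2 out r c 2) out) g) i j =
      if a ≤ (i : Int) ∧ (i : Int) < r2 ∧ c1 < (j : Int) ∧ (j : Int) < c2 then
        (pvCell g i j).map (fun _ => 2)
      else pvCell g i j := by
  induction n with
  | zero =>
    intro a ha hn g i j
    rw [show PySem.List.pyRange a r2 1 = [] from PySem.List.pyRange_one_eq_nil (by omega)]
    rw [List.foldl_nil, if_neg (by omega)]
  | succ n ih =>
    intro a ha hn g i j
    rw [show PySem.List.pyRange a r2 1 = a :: PySem.List.pyRange (a + 1) r2 1 from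
      PySem.List.pyRange_one_cons (by omega), List.foldl_cons]
    rw [ih (a + 1) (by omega) (by omega)]
    rw [pvCell_colLoop a ha ((c2 - (c1 + 1)).toNat) (c1 + 1) c2 hc rfl g i j]
    split_ifs <;> first | rfl | (exfalso; omega)

lemma pvCell_fillA (r1 r2 c1 c2 : Int) (hr : 0 ≤ r1 + 1) (hc : 0 ≤ c1 + 1)
    (g : List (List Int)) (i j : Nat) :
    pvCell (pvFillA r1 r2 c1 c2 g) i j =
      if r1 < (i : Int) ∧ (i : Int) < r2 ∧ c1 < (j : Int) ∧ (j : Int) < c2 then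
        (pvCell g i j).map (fun _ => 2)
      else pvCell g i j := by
  unfold pvFillA
  rw [pvCell_rowLoop r2 c1 c2 hc ((r2 - (r1 + 1)).toNat) (r1 + 1) hr rfl g i j]
  split_ifs <;> first | rfl | (exfalso; omega)

lemma pvShape_fillA (r1 r2 c1 c2 : Int) (hr : 0 ≤ r1 + 1) (g : List (List Int)) :
    (pvFillA r1 r2 c1 c2 g).map List.length = g.map List.length := by
  unfold pvFillA
  refine pvFoldlInv (fun s => s.map List.length = g.map List.length) _ _ ?_ g rfl
  intro s r hrmem hs
  refine pvFoldlInv (fun s => s.map List.length = g.map List.length) _ _ ?_ s hs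
  intro s c _ hs
  rw [pvShape_set2 s r c (by have := PySem.List.mem_pyRange_one.mp hrmem; omega) 2, hs]

lemma pvGetD_nonneg (cs : List Int) (hcs : ∀ c ∈ cs, 0 ≤ c) (k : Nat) : 0 ≤ cs.getD k 0 := by
  by_cases h : k < cs.length
  · rw [List.getD_eq_getElem?_getD, List.getElem?_eq_getElem h, Option.getD_some]
    exact hcs _ (List.getElem_mem h)
  · rw [List.getD_eq_getElem?_getD, List.getElem?_eq_none_iff.mpr (by omega), Option.getD_none]

lemma pvCell_jLoop (r1 r2 : Int) (hr : 0 ≤ r1 + 1) (cs : List Int)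
    (hcs : ∀ c ∈ cs, 0 ≤ c) (iv : Int) (hiv : 0 ≤ iv) (n : Nat) :
    ∀ a, 0 ≤ a → ((cs.length : Int) - a).toNat = n → ∀ g i j,
    pvCell ((PySem.List.pyRange a (cs.length : Int) 1).foldl (fun out jdx =>
        pvFillA r1 r2 (PySem.List.pyGetD cs iv 0) (PySem.List.pyGetD cs jdx 0) out) g) i j =
      if ∃ q : Nat, q < cs.length ∧ a ≤ (q : Int) ∧ r1 < (i : Int) ∧ (i : Int) < r2 ∧
            PySem.List.pyGetD cs iv 0 < (j : Int) ∧ (j : Int) < cs.getD q 0 then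
        (pvCell g i j).map (fun _ => 2)
      else pvCell g i j := by
  induction n with
  | zero =>
    intro a ha hn g i j
    rw [show PySem.List.pyRange a (cs.length : Int) 1 = [] from
      PySem.List.pyRange_one_eq_nil (by omega)]
    rw [List.foldl_nil, if_neg (by rintro ⟨q, h1, h2, -⟩; omega)]
  | succ n ih =>
    intro a ha hn g i j
    rw [show PySem.List.pyRange a (cs.length : Int) 1 =
        a :: PySem.List.pyRange (a + 1) (cs.length : Int) 1 from
      PySem.List.pyRange_one_cons (by omega), List.foldl_cons]
    rw [ih (a + 1) (by omega) (by omega)]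
    have hc1 : 0 ≤ PySem.List.pyGetD cs iv 0 := by
      rw [PySem.List.pyGetD_of_nonneg cs 0 hiv]; exact pvGetD_nonneg cs hcs _
    rw [pvCell_fillA r1 r2 (PySem.List.pyGetD cs iv 0) (PySem.List.pyGetD cs a 0) hr
      (by omega) g i j]
    rw [PySem.List.pyGetD_of_nonneg cs 0 ha]
    by_cases hE' : ∃ q : Nat, q < cs.length ∧ a + 1 ≤ (q : Int) ∧ r1 < (i : Int) ∧
        (i : Int) < r2 ∧ PySem.List.pyGetD cs iv 0 < (j : Int) ∧ (j : Int) < cs.getD q 0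
    · rw [if_pos hE']
      obtain ⟨q, h1, h2, h3⟩ := hE'
      have hE : ∃ q : Nat, q < cs.length ∧ a ≤ (q : Int) ∧ r1 < (i : Int) ∧ (i : Int) < r2 ∧
          PySem.List.pyGetD cs iv 0 < (j : Int) ∧ (j : Int) < cs.getD q 0 := ⟨q, h1, by omega, h3⟩
      rw [if_pos hE]
      split_ifs <;> cases pvCell g i j <;> rfl
    · rw [if_neg hE']
      by_cases hF : r1 < (i : Int) ∧ (i : Int) < r2 ∧ PySem.List.pyGetD cs iv 0 < (j : Int) ∧
          (j : Int) < cs.getD a.toNat 0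
      · rw [if_pos hF]
        exact (if_pos ⟨a.toNat, by omega, by omega, hF⟩).symm
      · rw [if_neg hF]
        rw [if_neg ?hne]
        case hne =>
          rintro ⟨q, h1, h2, h3⟩
          by_cases hq : a + 1 ≤ (q : Int)
          · exact hE' ⟨q, h1, hq, h3⟩
          · have : q = a.toNat := by omega
            subst this
            exact hF h3

lemma pvCell_iLoop (r1 r2 : Int) (hr : 0 ≤ r1 + 1) (cs : List Int)
    (hcs : ∀ c ∈ cs, 0 ≤ c) (n : Nat) :
    ∀ a, 0 ≤ a → ((cs.length : Int) - a).toNat = n → ∀ g i j,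
    pvCell ((PySem.List.pyRange a (cs.length : Int) 1).foldl (fun out idx =>
        (PySem.List.pyRange (idx + 1) (cs.length : Int) 1).foldl (fun out jdx =>
          pvFillA r1 r2 (PySem.List.pyGetD cs idx 0) (PySem.List.pyGetD cs jdx 0) out) out) g) i j =
      if ∃ p : Nat, p < cs.length ∧ ∃ q : Nat, q < cs.length ∧ p < q ∧ a ≤ (p : Int) ∧
            r1 < (i : Int) ∧ (i : Int) < r2 ∧ cs.getD p 0 < (j : Int) ∧ (j : Int) < cs.getD q 0 then
        (pvCell g i j).map (fun _ => 2)
      else pvCell g i j := by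
  induction n with
  | zero =>
    intro a ha hn g i j
    rw [show PySem.List.pyRange a (cs.length : Int) 1 = [] from
      PySem.List.pyRange_one_eq_nil (by omega)]
    rw [List.foldl_nil, if_neg (by rintro ⟨p, h1, q, h2, h3, h4, -⟩; omega)]
  | succ n ih =>
    intro a ha hn g i j
    rw [show PySem.List.pyRange a (cs.length : Int) 1 =
        a :: PySem.List.pyRange (a + 1) (cs.length : Int) 1 from
      PySem.List.pyRange_one_cons (by omega), List.foldl_cons]
    rw [ih (a + 1) (by omega) (by omega)]
    rw [pvCell_jLoop r1 r2 hr cs hcs a ha (((cs.length : Int) - (a + 1)).toNat) (a + 1)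
      (by omega) rfl g i j]
    rw [PySem.List.pyGetD_of_nonneg cs 0 ha]
    by_cases hE' : ∃ p : Nat, p < cs.length ∧ ∃ q : Nat, q < cs.length ∧ p < q ∧
        a + 1 ≤ (p : Int) ∧ r1 < (i : Int) ∧ (i : Int) < r2 ∧ cs.getD p 0 < (j : Int) ∧
        (j : Int) < cs.getD q 0
    · rw [if_pos hE']
      obtain ⟨p, hp, q, hq, hpq, hap, hR⟩ := hE'
      have hE : ∃ p : Nat, p < cs.length ∧ ∃ q : Nat, q < cs.length ∧ p < q ∧ a ≤ (p : Int) ∧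
          r1 < (i : Int) ∧ (i : Int) < r2 ∧ cs.getD p 0 < (j : Int) ∧ (j : Int) < cs.getD q 0 :=
        ⟨p, hp, q, hq, hpq, by omega, hR⟩
      rw [if_pos hE]
      split_ifs <;> cases pvCell g i j <;> rfl
    · rw [if_neg hE']
      by_cases hF : ∃ q : Nat, q < cs.length ∧ a + 1 ≤ (q : Int) ∧ r1 < (i : Int) ∧
          (i : Int) < r2 ∧ cs.getD a.toNat 0 < (j : Int) ∧ (j : Int) < cs.getD q 0
      · rw [if_pos hF]
        obtain ⟨q, h1, h2, h3, h4, h5, h6⟩ := hF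
        exact (if_pos ⟨a.toNat, by omega, q, h1, by omega, by omega, h3, h4, h5, h6⟩).symm
      · rw [if_neg hF]
        rw [if_neg ?hne]
        case hne =>
          rintro ⟨p, hp, q, hq, hpq, hap, hR⟩
          by_cases hp' : a + 1 ≤ (p : Int)
          · exact hE' ⟨p, hp, q, hq, hpq, hp', hR⟩
          · have : p = a.toNat := by omega
            subst this
            exact hF ⟨q, hq, by omega, hR.1, hR.2.1, hR.2.2.1, hR.2.2.2⟩

lemma pvSliceFill_length (row : List Int) (lo hi : Int) (h0 : 0 ≤ lo) (hlh : lo ≤ hi)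
    (hhi : hi ≤ (row.length : Int)) : (pvSliceFill row lo hi).length = row.length := by
  unfold pvSliceFill
  rw [PySem.List.slice_to row h0, PySem.List.slice_from row (by omega : 0 ≤ hi)]
  simp only [List.length_append, List.length_take, List.length_replicate, List.length_drop]
  omega

lemma pvSliceFill_getElem? (row : List Int) (lo hi : Int) (h0 : 0 ≤ lo) (hlh : lo ≤ hi)
    (hhi : hi ≤ (row.length : Int)) (j : Nat) :
    (pvSliceFill row lo hi)[j]? =
      if lo ≤ (j : Int) ∧ (j : Int) < hi then (row[j]?).map (fun _ => 2) else row[j]? := by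
  unfold pvSliceFill
  rw [PySem.List.slice_to row h0, PySem.List.slice_from row (by omega : 0 ≤ hi),
    List.append_assoc]
  have hlen1 : (row.take lo.toNat).length = lo.toNat := by
    rw [List.length_take]; omega
  by_cases hj1 : j < lo.toNat
  · rw [List.getElem?_append_left (by omega), List.getElem?_take_of_lt hj1, if_neg (by omega)]
  · rw [List.getElem?_append_right (by omega), hlen1]
    by_cases hj2 : j - lo.toNat < (hi - lo).toNat
    · rw [List.getElem?_append_left (by simpa using hj2), List.getElem?_replicate, if_pos hj2,
        if_pos (by omega)]
      have hjr : j < row.length := by omega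
      rw [List.getElem?_eq_getElem hjr, Option.map_some]
    · rw [List.getElem?_append_right (by simpa using hj2), List.length_replicate,
        List.getElem?_drop, if_neg (by omega)]
      congr 1
      omega

lemma pvCell_BrowLoop (r2 lo hi : Int) (h0 : 0 ≤ lo) (hlh : lo ≤ hi) (pro : List Nat)
    (hbound : ∀ i : Nat, i < pro.length → (i : Int) < r2 → hi ≤ (pro.getD i 0 : Int))
    (hlen : r2 ≤ (pro.length : Int)) (n : Nat) :
    ∀ a, 0 ≤ a → (r2 - a).toNat = n → ∀ g, g.map List.length = pro → ∀ i j,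
    pvCell ((PySem.List.pyRange a r2 1).foldl (fun out r =>
        PySem.List.pySetD out r (pvSliceFill (PySem.List.pyGetD out r []) lo hi)) g) i j =
      if a ≤ (i : Int) ∧ (i : Int) < r2 ∧ lo ≤ (j : Int) ∧ (j : Int) < hi then
        (pvCell g i j).map (fun _ => 2)
      else pvCell g i j := by
  induction n with
  | zero =>
    intro a ha hn g hg i j
    rw [show PySem.List.pyRange a r2 1 = [] from PySem.List.pyRange_one_eq_nil (by omega)]
    rw [List.foldl_nil, if_neg (by omega)]
  | succ n ih =>
    intro a ha hn g hg i j
    rw [show PySem.List.pyRange a r2 1 = a :: PySem.List.pyRange (a + 1) r2 1 from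
      PySem.List.pyRange_one_cons (by omega), List.foldl_cons]
    -- facts about the row being rewritten
    have hglen : g.length = pro.length := by simpa using congrArg List.length hg
    have hina : a.toNat < g.length := by omega
    have hrowlen : (g[a.toNat]).length = pro.getD a.toNat 0 := by
      have h1 := congrArg (fun l => l[a.toNat]?) hg
      simp only [List.getElem?_map, List.getElem?_eq_getElem, hina, Option.map_some] at h1
      rw [List.getD_eq_getElem?_getD, ← h1]
      simp
    have hhia : hi ≤ ((g[a.toNat]).length : Int) := by
      rw [hrowlen]; exact hbound a.toNat (by omega) (by omega)
    have hrowget : PySem.List.pyGetD g a [] = g[a.toNat] := by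
      rw [PySem.List.pyGetD_of_nonneg g [] ha, List.getD_eq_getElem?_getD,
        List.getElem?_eq_getElem hina, Option.getD_some]
    -- the step preserves the shape
    have hshape : (PySem.List.pySetD g a (pvSliceFill (PySem.List.pyGetD g a []) lo hi)).map
        List.length = pro := by
      rw [PySem.List.pySetD_of_nonneg g _ ha, List.map_set, hrowget,
        pvSliceFill_length _ lo hi h0 hlh hhia, hg]
      apply List.ext_getElem?
      intro k
      rw [List.getElem?_set]
      by_cases hk : a.toNat = k
      · subst hk
        rw [if_pos rfl, if_pos (by omega), hrowlen]
        simp [List.getD_eq_getElem?_getD,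
          List.getElem?_eq_getElem (show a.toNat < pro.length by omega)]
      · rw [if_neg hk]
    rw [ih (a + 1) (by omega) (by omega) _ hshape i j]
    -- cell characterization of the step
    have hstep : ∀ i' j' : Nat,
        pvCell (PySem.List.pySetD g a (pvSliceFill (PySem.List.pyGetD g a []) lo hi)) i' j' =
          if a = (i' : Int) ∧ lo ≤ (j' : Int) ∧ (j' : Int) < hi then
            (pvCell g i' j').map (fun _ => 2)
          else pvCell g i' j' := by
      intro i' j'
      simp only [pvCell]
      rw [PySem.List.pySetD_of_nonneg g _ ha, List.getElem?_set]
      by_cases h : a = (i' : Int)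
      · have ht : a.toNat = i' := by omega
        subst ht
        rw [if_pos rfl, if_pos hina, hrowget]
        simp only [Option.getD_some]
        rw [pvSliceFill_getElem? _ lo hi h0 hlh hhia j']
        rw [List.getElem?_eq_getElem hina, Option.getD_some]
        by_cases h2 : lo ≤ (j' : Int) ∧ (j' : Int) < hi
        · rw [if_pos h2, if_pos ⟨h, h2⟩]
        · rw [if_neg h2, if_neg (by tauto)]
      · have ht : a.toNat ≠ i' := by omega
        rw [if_neg ht, if_neg (by tauto)]
    rw [hstep i j]
    split_ifs <;> first | rfl | (exfalso; omega)

lemma pvShape_BsliceStep (g : List (List Int)) (r lo hi : Int) (hr : 0 ≤ r) (h0 : 0 ≤ lo)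
    (hlh : lo ≤ hi) (hhi : hi ≤ ((PySem.List.pyGetD g r []).length : Int)) :
    (PySem.List.pySetD g r (pvSliceFill (PySem.List.pyGetD g r []) lo hi)).map List.length =
      g.map List.length := by
  rw [PySem.List.pySetD_of_nonneg g _ hr, List.map_set,
    pvSliceFill_length _ _ _ h0 hlh hhi]
  by_cases hin : r.toNat < g.length
  · have hget : PySem.List.pyGetD g r [] = g[r.toNat] := by
      rw [PySem.List.pyGetD_of_nonneg g [] hr, List.getD_eq_getElem?_getD,
        List.getElem?_eq_getElem hin, Option.getD_some]
    apply List.ext_getElem?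
    intro k
    rw [List.getElem?_set]
    by_cases hk : r.toNat = k
    · subst hk
      rw [if_pos rfl, if_pos (by simpa using hin), hget]
      simp [hin]
    · rw [if_neg hk]
  · rw [List.set_eq_of_length_le (by simpa using Nat.le_of_not_lt hin)]

lemma pvShape_pairLoops (r1 r2 : Int) (hr : 0 ≤ r1 + 1) (cs : List Int)
    (g : List (List Int)) :
    ((PySem.List.pyRange 0 ((cs.length : Int)) 1).foldl (fun out idx =>
        (PySem.List.pyRange (idx + 1) ((cs.length : Int)) 1).foldl (fun out jdx =>
          pvFillA r1 r2 (PySem.List.pyGetD cs idx 0) (PySem.List.pyGetD cs jdx 0) out) out) g).map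
      List.length = g.map List.length := by
  refine pvFoldlInv (fun s => s.map List.length = g.map List.length) _ _ ?_ g rfl
  intro s idx _ hs
  refine pvFoldlInv (fun s => s.map List.length = g.map List.length) _ _ ?_ s hs
  intro s jdx _ hs
  rw [pvShape_fillA r1 r2 _ _ hr s, hs]

lemma pvGetD_mono (cs : List Int) (hpw : cs.Pairwise (· < ·)) (p q : Nat) (hpq : p ≤ q)
    (hq : q < cs.length) : cs.getD p 0 ≤ cs.getD q 0 := by
  rcases Nat.lt_or_ge p q with h | h
  · have := List.pairwise_iff_getElem.mp hpw p q (by omega) hq h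
    rw [List.getD_eq_getElem?_getD, List.getD_eq_getElem?_getD,
      List.getElem?_eq_getElem (by omega : p < cs.length), List.getElem?_eq_getElem hq]
    simpa using le_of_lt this
  · have : p = q := by omega
    subst this
    exact le_refl _

lemma pvCommon_eq (grid : List (List Int)) (cols : Int) (r1 r2 : Int) (h1 : 0 ≤ r1)
    (h2 : 0 ≤ r2) (h3 : r1 < (grid.length : Int)) (h4 : r2 < (grid.length : Int)) :
    (PySem.List.pyGetD (grid.map (fun row =>
        (PySem.List.pyRange 0 cols 1).filter (fun c => PySem.List.pyGetD row c 0 == 4))) r1 []).filter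
      (fun c => decide (c ∈ PySem.List.pyGetD (grid.map (fun row =>
        (PySem.List.pyRange 0 cols 1).filter (fun c => PySem.List.pyGetD row c 0 == 4))) r2 [])) =
    (PySem.List.pyRange 0 cols 1).filter
      (fun c => pvGet2 grid r1 c == 4 && pvGet2 grid r2 c == 4) := by
  have hmap : ∀ r : Int, 0 ≤ r → r < (grid.length : Int) →
      PySem.List.pyGetD (grid.map (fun row =>
        (PySem.List.pyRange 0 cols 1).filter (fun c => PySem.List.pyGetD row c 0 == 4))) r [] =
      (PySem.List.pyRange 0 cols 1).filter
        (fun c => PySem.List.pyGetD (PySem.List.pyGetD grid r []) c 0 == 4) := by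
    intro r hr hrlen
    have hin : r.toNat < grid.length := by omega
    rw [PySem.List.pyGetD_of_nonneg _ [] hr, PySem.List.pyGetD_of_nonneg grid [] hr,
      List.getD_eq_getElem?_getD, List.getD_eq_getElem?_getD, List.getElem?_map,
      List.getElem?_eq_getElem hin]
    simp
  rw [hmap r1 h1 h3, hmap r2 h2 h4, List.filter_filter]
  apply List.filter_congr
  intro c hc
  simp only [pvGet2, List.mem_filter, hc, true_and]
  by_cases hc2 : PySem.List.pyGetD (PySem.List.pyGetD grid r2 []) c 0 == 4 <;>
    by_cases hc1 : PySem.List.pyGetD (PySem.List.pyGetD grid r1 []) c 0 == 4 <;>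
      simp [hc1, hc2]

lemma pvPair_eq (grid : List (List Int)) (r1 r2 cols : Int) (h0 : 0 ≤ r1) (_h12 : r1 < r2)
    (h2 : r2 < (grid.length : Int)) (cs : List Int)
    (hcs : cs = (PySem.List.pyRange 0 cols 1).filter
      (fun c => pvGet2 grid r1 c == 4 && pvGet2 grid r2 c == 4))
    (hbnd : ∀ k : Nat, k < grid.length → cols ≤ ((grid.map List.length).getD k 0 : Int))
    (s : List (List Int)) (hs : s.map List.length = grid.map List.length) :
    (if 2 ≤ cs.length then
      (PySem.List.pyRange 0 ((cs.length : Int)) 1).foldl (fun out i =>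
        (PySem.List.pyRange (i + 1) ((cs.length : Int)) 1).foldl (fun out j =>
          pvFillA r1 r2 (PySem.List.pyGetD cs i 0) (PySem.List.pyGetD cs j 0) out) out) s
     else s) =
    (if 2 ≤ cs.length then
      (PySem.List.pyRange (r1 + 1) r2 1).foldl (fun out r =>
        PySem.List.pySetD out r (pvSliceFill (PySem.List.pyGetD out r [])
          (PySem.List.pyGetD cs 0 0 + 1) (PySem.List.pyGetD cs (-1) 0))) s
     else s) := by
  by_cases hg2 : 2 ≤ cs.length
  · rw [if_pos hg2, if_pos hg2]
    have hpw : cs.Pairwise (· < ·) := by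
      rw [hcs]; exact (PySem.List.pairwise_lt_pyRange_one 0 cols).filter _
    have hmemb : ∀ c ∈ cs, 0 ≤ c ∧ c < cols := by
      intro c hc
      rw [hcs] at hc
      have := (List.mem_filter.mp hc).1
      exact PySem.List.mem_pyRange_one.mp this
    have hnn : ∀ c ∈ cs, 0 ≤ c := fun c hc => (hmemb c hc).1
    have hcsne : cs ≠ [] := by
      intro h; rw [h] at hg2; simp at hg2
    have hzero : PySem.List.pyGetD cs 0 0 = cs.getD 0 0 := by
      rw [PySem.List.pyGetD_of_nonneg cs 0 (by omega)]; rfl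
    have hlast : PySem.List.pyGetD cs (-1) 0 = cs.getD (cs.length - 1) 0 := by
      rw [PySem.List.pyGetD_neg_one cs 0 hcsne, List.getLast_eq_getElem,
        List.getD_eq_getElem?_getD, List.getElem?_eq_getElem (by omega), Option.getD_some]
    rw [hzero, hlast]
    have hLnn : 0 ≤ cs.getD 0 0 := pvGetD_nonneg cs hnn 0
    have hLH : cs.getD 0 0 < cs.getD (cs.length - 1) 0 := by
      have := List.pairwise_iff_getElem.mp hpw 0 (cs.length - 1) (by omega) (by omega) (by omega)
      rw [List.getD_eq_getElem?_getD, List.getD_eq_getElem?_getD,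
        List.getElem?_eq_getElem (by omega : 0 < cs.length),
        List.getElem?_eq_getElem (by omega : cs.length - 1 < cs.length)]
      simpa using this
    have hHcols : cs.getD (cs.length - 1) 0 < cols := by
      have hmem : cs.getD (cs.length - 1) 0 ∈ cs := by
        rw [List.getD_eq_getElem?_getD,
          List.getElem?_eq_getElem (by omega : cs.length - 1 < cs.length), Option.getD_some]
        exact List.getElem_mem _
      exact (hmemb _ hmem).2
    have hslen : s.length = grid.length := by simpa using congrArg List.length hs
    -- the B-side fold preserves the shape
    have hBshape : ∀ t, t.map List.length = grid.map List.length →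
        ((PySem.List.pyRange (r1 + 1) r2 1).foldl (fun out r =>
          PySem.List.pySetD out r (pvSliceFill (PySem.List.pyGetD out r [])
            (cs.getD 0 0 + 1) (cs.getD (cs.length - 1) 0))) t).map List.length =
          grid.map List.length := by
      intro t ht
      refine pvFoldlInv (fun u => u.map List.length = grid.map List.length) _ _ ?_ t ht
      intro u r hr hu
      have hrb := PySem.List.mem_pyRange_one.mp hr
      have hulen : u.length = grid.length := by simpa using congrArg List.length hu
      have hin : r.toNat < u.length := by omega
      have hrow : (PySem.List.pyGetD u r []).length = (grid.map List.length).getD r.toNat 0 := by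
        rw [PySem.List.pyGetD_of_nonneg u [] (by omega), List.getD_eq_getElem?_getD,
          List.getElem?_eq_getElem hin, Option.getD_some, ← hu]
        simp [hin, List.getD_eq_getElem?_getD]
      rw [pvShape_BsliceStep u r _ _ (by omega) (by omega) (by omega) ?hb, hu]
      case hb =>
        rw [hrow]
        have := hbnd r.toNat (by omega)
        omega
    apply pvExt2
    · rw [pvShape_pairLoops r1 r2 (by omega) cs s, hs, hBshape s hs]
    · intro i j
      rw [pvCell_iLoop r1 r2 (by omega) cs hnn (((cs.length : Int) - 0).toNat) 0 (by omega)
        rfl s i j]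
      rw [pvCell_BrowLoop r2 (cs.getD 0 0 + 1) (cs.getD (cs.length - 1) 0) (by omega)
        (by omega) (grid.map List.length) ?hbd (by simp only [List.length_map]; omega)
        ((r2 - (r1 + 1)).toNat) (r1 + 1) (by omega) rfl s hs i j]
      case hbd =>
        intro k hk _
        have := hbnd k (by simpa using hk)
        omega
      refine if_congr ?_ rfl rfl
      constructor
      · rintro ⟨p, hp, q, hq, hpq, -, hri, hir, hpj, hjq⟩
        have hm1 : cs.getD 0 0 ≤ cs.getD p 0 := pvGetD_mono cs hpw 0 p (by omega) hp
        have hm2 : cs.getD q 0 ≤ cs.getD (cs.length - 1) 0 :=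
          pvGetD_mono cs hpw q (cs.length - 1) (by omega) (by omega)
        exact ⟨by omega, hir, by omega, by omega⟩
      · rintro ⟨hri, hir, hlj, hjh⟩
        exact ⟨0, by omega, cs.length - 1, by omega, by omega, by omega, by omega, hir,
          by omega, by omega⟩
  · rw [if_neg hg2, if_neg hg2]

-- ===== VERDICT (by name: the statement is the Claim_ definition above) =====
theorem transform_spec : Claim_equal_transform := by
  intro grid _ hpre
  unfold Spec_transform transform transform_alt
  by_cases hne : grid = []
  · rw [if_pos hne, if_pos hne]
  · rw [if_neg hne, if_neg hne]
    have hlen0 : 0 < grid.length := List.length_pos_iff.mpr hne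
    have hout0 : (grid.map fun row => PySem.List.slice row none none) = grid := by
      simp [PySem.List.slice_none_none]
    have hbnd : ∀ k : Nat, k < grid.length →
        ((PySem.List.pyGetD grid 0 []).length : Int) ≤ ((grid.map List.length).getD k 0 : Int) := by
      intro k hk
      have hmem : grid[k] ∈ grid := List.getElem_mem hk
      have := hpre grid[k] hmem
      have hget : (grid.map List.length).getD k 0 = grid[k].length := by
        rw [List.getD_eq_getElem?_getD, List.getElem?_map, List.getElem?_eq_getElem hk]
        simp
      omega
    dsimp only
    refine pvFoldlCongrInv (fun s => s.map List.length = grid.map List.length) _ _ _ ?_ _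
      (by rw [hout0])
    intro s r1 hr1 hs
    have hr1b := PySem.List.mem_pyRange_one.mp hr1
    refine ⟨?_, ?_⟩
    · refine pvFoldlCongrInv (fun s => s.map List.length = grid.map List.length) _ _ _ ?_ s hs
      intro t r2 hr2 ht
      have hr2b := PySem.List.mem_pyRange_one.mp hr2
      dsimp only
      rw [pvCommon_eq grid ((PySem.List.pyGetD grid 0 []).length : Int) r1 r2 (by omega)
        (by omega) (by omega) (by omega)]
      refine ⟨?_, ?_⟩
      · exact pvPair_eq grid r1 r2 ((PySem.List.pyGetD grid 0 []).length : Int) (by omega)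
          (by omega) (by omega) _ rfl hbnd t ht
      · by_cases hg2 : 2 ≤ ((PySem.List.pyRange 0 ((PySem.List.pyGetD grid 0 []).length : Int)
            1).filter (fun c => pvGet2 grid r1 c == 4 && pvGet2 grid r2 c == 4)).length
        · rw [if_pos hg2, pvShape_pairLoops r1 r2 (by omega) _ t, ht]
        · rw [if_neg hg2, ht]
    · refine pvFoldlInv (fun s => s.map List.length = grid.map List.length) _ _ ?_ s hs
      intro t r2 hr2 ht
      have hr2b := PySem.List.mem_pyRange_one.mp hr2
      by_cases hg2 : 2 ≤ ((PySem.List.pyRange 0 ((PySem.List.pyGetD grid 0 []).length : Int)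
          1).filter (fun c => pvGet2 grid r1 c == 4 && pvGet2 grid r2 c == 4)).length
      · rw [if_pos hg2, pvShape_pairLoops r1 r2 (by omega) _ t, ht]
      · rw [if_neg hg2, ht]
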